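-- pv_equiv track=rewrite | github.com/cielavenir/checkio | scientific-expedition/acm91-problema-triangular-vertices.py | rowcol
-- ===== SOURCE A (Python) =====
-- def rowcol(p):
-- 	row=[]
-- 	col=[]
-- 	for e in p:
-- 		head=inc=1
-- 		while e>=head+inc:
-- 			head+=inc
-- 			inc+=1
-- 		row.append(inc)
-- 		col.append(e-head)
-- 	return (row,col)
-- ===== SOURCE B (Python) =====
-- def rowcol(p):
--     row = []
--     col = []
--     for e in p:
--         if e <= 1:
--             k = 1
--         else:
--             lo, hi = 1, e
--             while lo < hi:
--                 mid = (lo + hi) // 2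
--                 if mid * (mid + 1) >= 2 * e:
--                     hi = mid
--                 else:
--                     lo = mid + 1
--             k = lo
--         row.append(k)
--         col.append(e - 1 - k * (k - 1) // 2)
--     return (row, col)
-- ===== Notes on version B (the rewrite author's own statement) =====
-- stated objective: faster
-- what changed: The per-element linear walk up the triangular numbers (head/inc loop) is replaced by a binary search for the least row k with k(k+1)/2 >= e, and the column is computed in closed form as e-1-k(k-1)/2.
import Mathlib
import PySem

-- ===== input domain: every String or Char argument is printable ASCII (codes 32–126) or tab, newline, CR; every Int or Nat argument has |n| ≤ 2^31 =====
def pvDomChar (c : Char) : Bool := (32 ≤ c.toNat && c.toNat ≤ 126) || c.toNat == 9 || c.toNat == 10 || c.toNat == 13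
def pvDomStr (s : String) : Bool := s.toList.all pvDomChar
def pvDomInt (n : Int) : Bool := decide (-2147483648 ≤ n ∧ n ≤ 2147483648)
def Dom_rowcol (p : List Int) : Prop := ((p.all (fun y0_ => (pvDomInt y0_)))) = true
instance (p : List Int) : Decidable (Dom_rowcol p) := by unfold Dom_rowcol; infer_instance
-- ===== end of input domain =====

-- B replaces A's per-element linear walk up the triangular numbers by a binary search for
-- the least row k with k(k+1) ≥ 2e plus a closed-form column; objective: faster (asymptotic).

-- ===== PORT A =====
-- A's inner `while e >= head+inc: head += inc; inc += 1`.  inc is represented as n+1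
-- (n : Nat); inc always equals n+1 as a value, which makes the loop's termination
-- (head+inc grows by at least 2 each step) expressible as a measure.
def rowcolWalk (e head : Int) (n : Nat) : Int × Int :=
  if head + ((n : Int) + 1) ≤ e then
    rowcolWalk e (head + ((n : Int) + 1)) (n + 1)
  else
    (((n : Int) + 1), e - head)
termination_by (e + 1 - head - (n : Int)).toNat
decreasing_by omega

-- A's `for e in p` loop, appending to row and col
def rowcolGo (rest row col : List Int) : List Int × List Int :=
  match rest with
  | [] => (row, col)
  | e :: t =>
      let r := rowcolWalk e 1 0   -- head = inc = 1, i.e. n = 0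
      rowcolGo t (row ++ [r.1]) (col ++ [r.2])

def rowcol (p : List Int) : List Int × List Int := rowcolGo p [] []

-- ===== PORT B =====
-- B's `while lo < hi` binary search for the least k with k*(k+1) >= 2*e
def rowcolBS (e lo hi : Int) : Int :=
  if lo < hi then
    let mid := PySem.Int.floordiv (lo + hi) 2
    if mid * (mid + 1) ≥ 2 * e then rowcolBS e lo mid else rowcolBS e (mid + 1) hi
  else lo
termination_by (hi - lo).toNat
decreasing_by
  · have hlt : PySem.Int.floordiv (lo + hi) 2 < hi := by
      rw [PySem.Int.floordiv_lt_iff_lt_mul (by norm_num)]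
      omega
    omega
  · have hb := PySem.Int.floordiv_two_mid_bounds (le_of_lt (by assumption : lo < hi))
    omega

-- B's per-element row computation (`if e <= 1: k = 1 else: binary search`)
def rowcolK (e : Int) : Int := if e ≤ 1 then 1 else rowcolBS e 1 e

-- B's `for e in p` loop
def rowcolAltGo (rest row col : List Int) : List Int × List Int :=
  match rest with
  | [] => (row, col)
  | e :: t =>
      let k := rowcolK e
      rowcolAltGo t (row ++ [k]) (col ++ [e - 1 - PySem.Int.floordiv (k * (k - 1)) 2])

def rowcol_alt (p : List Int) : List Int × List Int := rowcolAltGo p [] []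

-- ===== PRECONDITION & SPEC =====
def Spec_rowcol (p : List Int) (out : List Int × List Int) : Prop := out = rowcol_alt p
instance (p : List Int) (out : List Int × List Int) : Decidable (Spec_rowcol p out) := by unfold Spec_rowcol; infer_instance

-- ===== CLAIM (what is proved, stated in full; the proofs are below) =====
def Claim_equal_rowcol : Prop := ∀ (p : List Int), Dom_rowcol p → Spec_rowcol p (rowcol p)

-- ===== LEMMAS AND PROOFS =====

-- k is the least row ≥ 1 whose triangular number T(k) = k(k+1)/2 reaches e
def isRowK (e k : Int) : Prop := 1 ≤ k ∧ 2 * e ≤ k * (k + 1) ∧ (k = 1 ∨ (k - 1) * k < 2 * e)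

theorem isRowK_unique {e j k : Int} (hj : isRowK e j) (hk : isRowK e k) : j = k := by
  obtain ⟨hj1, hj2, hj3⟩ := hj
  obtain ⟨hk1, hk2, hk3⟩ := hk
  rcases lt_trichotomy j k with h | h | h
  · rcases hk3 with h1 | h1
    · omega
    · have : j * (j + 1) ≤ (k - 1) * k :=
        mul_le_mul (by omega) (by omega) (by omega) (by omega)
      omega
  · exact h
  · rcases hj3 with h1 | h1
    · omega
    · have : k * (k + 1) ≤ (j - 1) * j :=
        mul_le_mul (by omega) (by omega) (by omega) (by omega)
      omega

theorem walk_spec (e : Int) : ∀ (head : Int) (n : Nat),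
    2 * head = 2 + ((n : Int) + 1) * (n : Int) →
    ((n : Int) = 0 ∨ (n : Int) * ((n : Int) + 1) < 2 * e) →
    isRowK e (rowcolWalk e head n).1 ∧
      2 * (rowcolWalk e head n).2 =
        2 * e - 2 - (rowcolWalk e head n).1 * ((rowcolWalk e head n).1 - 1) := by
  intro head n
  induction head, n using rowcolWalk.induct (e := e) with
  | case1 head n hcond ih =>
    intro h1 h2
    rw [rowcolWalk, if_pos hcond]
    refine ih ?_ ?_
    · push_cast
      linear_combination h1
    · right
      push_cast
      nlinarith [h1, hcond]
  | case2 head n hcond =>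
    intro h1 h2
    rw [rowcolWalk, if_neg hcond]
    dsimp only
    refine ⟨⟨by omega, ?_, ?_⟩, by linear_combination -h1⟩
    · nlinarith [h1, hcond]
    · rcases h2 with h | h
      · left; omega
      · right
        have hid : ((n : Int) + 1 - 1) * ((n : Int) + 1) = (n : Int) * ((n : Int) + 1) := by ring
        linarith [hid, h]

theorem bs_spec (e : Int) : ∀ (lo hi : Int), 1 ≤ lo → lo ≤ hi →
    (lo = 1 ∨ (lo - 1) * lo < 2 * e) → 2 * e ≤ hi * (hi + 1) →
    isRowK e (rowcolBS e lo hi) := by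
  intro lo hi
  induction lo, hi using rowcolBS.induct (e := e) with
  | case1 lo hi hlt mid hmid ih =>
    intro h1 h2 h3 h4
    have hm : mid = PySem.Int.floordiv (lo + hi) 2 := rfl
    rw [hm] at hmid ih
    rw [rowcolBS, if_pos hlt]
    rw [if_pos hmid]
    have hb := PySem.Int.floordiv_two_mid_bounds (le_of_lt hlt)
    exact ih h1 (by omega) h3 hmid
  | case2 lo hi hlt mid hmid ih =>
    intro h1 h2 h3 h4
    have hm : mid = PySem.Int.floordiv (lo + hi) 2 := rfl
    rw [hm] at hmid ih
    rw [rowcolBS, if_pos hlt]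
    rw [if_neg hmid]
    have hb := PySem.Int.floordiv_two_mid_bounds (le_of_lt hlt)
    have hltm : PySem.Int.floordiv (lo + hi) 2 < hi := by
      rw [PySem.Int.floordiv_lt_iff_lt_mul (by norm_num)]
      omega
    refine ih (by omega) (by omega) ?_ h4
    right
    have : (PySem.Int.floordiv (lo + hi) 2 + 1 - 1) * (PySem.Int.floordiv (lo + hi) 2 + 1) = PySem.Int.floordiv (lo + hi) 2 * (PySem.Int.floordiv (lo + hi) 2 + 1) := by ring
    omega
  | case3 lo hi hlt =>
    intro h1 h2 h3 h4
    rw [rowcolBS, if_neg hlt]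
    have heq : lo = hi := by omega
    subst heq
    exact ⟨h1, h4, h3⟩

theorem floordiv_two_mul (m : Int) : PySem.Int.floordiv (2 * m) 2 = m := by
  rw [PySem.Int.floordiv_eq_ediv_of_pos (by norm_num)]
  exact Int.mul_ediv_cancel_left m (by norm_num)

theorem elem_eq (e : Int) :
    rowcolWalk e 1 0 = (rowcolK e, e - 1 - PySem.Int.floordiv (rowcolK e * (rowcolK e - 1)) 2) := by
  by_cases he : e ≤ 1
  · rw [rowcolWalk, if_neg (by push_cast; omega), rowcolK, if_pos he]
    have h0 : PySem.Int.floordiv ((1 : Int) * ((1 : Int) - 1)) 2 = 0 := by decide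
    rw [h0]
    norm_num
  · have hA := walk_spec e 1 0 (by norm_num) (by left; norm_num)
    have hkdef : rowcolK e = rowcolBS e 1 e := by rw [rowcolK, if_neg he]
    have hB : isRowK e (rowcolK e) := by
      rw [hkdef]
      exact bs_spec e 1 e le_rfl (by omega) (Or.inl rfl) (by nlinarith)
    have hfst : (rowcolWalk e 1 0).1 = rowcolK e := isRowK_unique hA.1 hB
    have hsnd := hA.2
    rw [hfst] at hsnd
    have hdiv : PySem.Int.floordiv (rowcolK e * (rowcolK e - 1)) 2 = e - 1 - (rowcolWalk e 1 0).2 := by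
      rw [show rowcolK e * (rowcolK e - 1) = 2 * (e - 1 - (rowcolWalk e 1 0).2) from by linarith]
      exact floordiv_two_mul _
    rw [hdiv]
    exact Prod.ext hfst (by omega)

theorem go_eq (rest : List Int) : ∀ row col, rowcolGo rest row col = rowcolAltGo rest row col := by
  induction rest with
  | nil => intro row col; rfl
  | cons e t ih =>
    intro row col
    rw [rowcolGo, rowcolAltGo]
    simp only [elem_eq e]
    exact ih _ _

-- ===== VERDICT (by name: the statement is the Claim_ definition above) =====
theorem rowcol_spec : Claim_equal_rowcol := by
  intro p _
  unfold Spec_rowcol rowcol rowcol_alt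
  exact go_eq p [] []
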